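-- pv_equiv track=rewrite | github.com/zhadyz/test | backend/migration/rule_renderer.py | _build_variable_mapping
-- ===== SOURCE A (Python) =====
-- from typing import Dict, List, Optional
--
-- def _build_variable_mapping(template_vars: Dict) -> Dict:
--     """
--     Build variable mapping from rule.yml vars to template variables.
--
--     CAC templates expect uppercase variables like PATH, KEY, VALUE.
--     Rule.yml defines lowercase like path, key, sep.
--
--     Args:
--         template_vars: Variables from rule.yml template.vars section
--
--     Returns:
--         Dictionary with properly mapped variables
--     """
--     mapping = {}
--
--     # Common variable mappings
--     var_map = {
--         'PATH': 'path',
--         'KEY': 'key',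
--         'VALUE': 'value',
--         'SEP': 'sep',
--         'SEP_REGEX': 'sep_regex',
--         'PREFIX_REGEX': 'prefix_regex',
--         'XCCDF_VARIABLE': 'xccdf_variable',
--     }
--
--     # Apply mappings
--     for upper_name, lower_name in var_map.items():
--         # Check both uppercase and lowercase keys
--         if lower_name in template_vars:
--             mapping[upper_name] = template_vars[lower_name]
--         elif lower_name.upper() in template_vars:
--             mapping[upper_name] = template_vars[lower_name.upper()]
--
--     # Also include any already-uppercase vars
--     for key, value in template_vars.items():
--         if key.isupper() and key not in mapping:
--             mapping[key] = value
--
--     return mapping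
-- ===== SOURCE B (Python) =====
-- _KNOWN = ('PATH', 'KEY', 'VALUE', 'SEP', 'SEP_REGEX', 'PREFIX_REGEX', 'XCCDF_VARIABLE')
-- _KNOWN_SET = frozenset(_KNOWN)
-- _LOWER_TO_UPPER = {name.lower(): name for name in _KNOWN}
--
--
-- def _build_variable_mapping(template_vars):
--     """One classification pass over the input, then assembly in canonical order.
--
--     Each input key is classified once: a known lowercase name (wins), the known
--     uppercase form (fallback), or some other all-uppercase key (kept verbatim);
--     everything else is dropped.  No membership probing of the input dict and no
--     'already in mapping' re-checks are needed.
--     """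
--     low = {}     # KNOWN name -> value supplied under its lowercase key (takes precedence)
--     up = {}      # KNOWN name -> value supplied under the uppercase key itself
--     extra = []   # other all-uppercase items, in input order
--     for key, value in template_vars.items():
--         name = _LOWER_TO_UPPER.get(key)
--         if name is not None:
--             low[name] = value
--         elif key in _KNOWN_SET:
--             up[key] = value
--         elif key.isupper():
--             extra.append((key, value))
--     mapping = {name: (low[name] if name in low else up[name])
--                for name in _KNOWN if name in low or name in up}
--     mapping.update(extra)
--     return mapping
-- ===== Notes on version B (the rewrite author's own statement) =====
-- stated objective: alternative
-- what changed: Replaces A's table-driven scheme (a loop over the fixed 7-entry table probing the input dict twice per entry, then an uppercase-filter loop re-checking 'key not in mapping') by a single classification pass over the input items into three buckets (known-lowercase, known-uppercase, other-uppercase) followed by an assembly step that needs no membership probes of the input and no 'already in mapping' re-checks.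
import Mathlib
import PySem

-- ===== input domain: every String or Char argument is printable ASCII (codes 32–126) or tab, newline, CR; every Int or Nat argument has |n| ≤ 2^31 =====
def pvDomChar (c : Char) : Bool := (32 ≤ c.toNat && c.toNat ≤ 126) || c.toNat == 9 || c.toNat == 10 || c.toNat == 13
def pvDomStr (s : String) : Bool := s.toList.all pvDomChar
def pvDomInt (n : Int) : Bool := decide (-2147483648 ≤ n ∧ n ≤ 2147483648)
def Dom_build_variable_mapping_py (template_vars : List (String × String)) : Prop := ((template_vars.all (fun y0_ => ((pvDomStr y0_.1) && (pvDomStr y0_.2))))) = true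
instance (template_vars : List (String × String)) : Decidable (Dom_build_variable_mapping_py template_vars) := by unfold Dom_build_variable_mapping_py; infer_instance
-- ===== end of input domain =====

-- B replaces A's table-driven scheme (a loop over the fixed 7-entry table probing the input dict,
-- then an uppercase-filter loop re-checking 'key not in mapping') by ONE classification pass over
-- the input items into three buckets plus an assembly step; objective: alternative decomposition.

-- Python str.isupper(), exact on the ASCII domain: no lowercase letter and at least one uppercase letter
def pvIsupperStr (s : String) : Bool :=
  s.toList.any PySem.Chars.isupper && !(s.toList.any PySem.Chars.islower)

-- ===== PORT A =====
def pvVarMapA : List (String × String) :=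
  [("PATH", "path"), ("KEY", "key"), ("VALUE", "value"), ("SEP", "sep"),
   ("SEP_REGEX", "sep_regex"), ("PREFIX_REGEX", "prefix_regex"),
   ("XCCDF_VARIABLE", "xccdf_variable")]

-- one step of A's first loop: 'if lower in tv: mapping[upper] = tv[lower] elif lower.upper() in tv: …'
def pvStepA (tv : PySem.Dict String String) (m : PySem.Dict String String)
    (uv : String × String) : PySem.Dict String String :=
  match tv.get? uv.2 with
  | some v => m.insert uv.1 v
  | none =>
    match tv.get? (PySem.Str.upper uv.2) with
    | some v => m.insert uv.1 v
    | none => m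

def build_variable_mapping_py (template_vars : List (String × String)) : List (String × String) :=
  let tv := PySem.Dict.mk template_vars
  let mapping := pvVarMapA.foldl (pvStepA tv) PySem.Dict.empty
  let mapping := tv.items.foldl
    (fun m kv => if pvIsupperStr kv.1 && !(m.contains kv.1) then m.insert kv.1 kv.2 else m)
    mapping
  mapping.items

-- ===== PORT B =====
def pvKnownB : List String :=
  ["PATH", "KEY", "VALUE", "SEP", "SEP_REGEX", "PREFIX_REGEX", "XCCDF_VARIABLE"]

-- B's frozenset of the known names
def pvKnownSetB : PySem.Set String := PySem.Set.ofList pvKnownB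

-- B's _LOWER_TO_UPPER dict comprehension
def pvLowerToUpper : PySem.Dict String String :=
  PySem.Dict.mk (pvKnownB.map (fun name => (PySem.Str.lower name, name)))

-- one step of B's classification loop: known-lowercase key / known-uppercase key / other uppercase key / dropped
def pvClassStep
    (st : PySem.Dict String String × PySem.Dict String String × List (String × String))
    (kv : String × String) :
    PySem.Dict String String × PySem.Dict String String × List (String × String) :=
  match pvLowerToUpper.get? kv.1 with
  | some name => (st.1.insert name kv.2, st.2.1, st.2.2)
  | none =>
    if pvKnownSetB.contains kv.1 then (st.1, st.2.1.insert kv.1 kv.2, st.2.2)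
    else if pvIsupperStr kv.1 then (st.1, st.2.1, st.2.2 ++ [kv])
    else st

-- one entry of B's assembly comprehension: low[name] wins, else up[name], else no entry
def pvBEntry (low up : PySem.Dict String String) (name : String) : Option (String × String) :=
  match low.get? name with
  | some v => some (name, v)
  | none => (up.get? name).map (fun v => (name, v))

def build_variable_mapping_py_alt (template_vars : List (String × String)) : List (String × String) :=
  let tv := PySem.Dict.mk template_vars
  let st := tv.items.foldl pvClassStep (PySem.Dict.empty, PySem.Dict.empty, [])
  let mapping := PySem.Dict.mk (pvKnownB.filterMap (pvBEntry st.1 st.2.1))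
  (st.2.2.foldl (fun m kv => m.insert kv.1 kv.2) mapping).items

-- ===== PRECONDITION & SPEC =====
-- Pre_ excludes association lists with duplicate keys: they do not represent any Python dict
-- (the Python argument is a dict, whose keys are necessarily distinct).
def Pre_build_variable_mapping_py (template_vars : List (String × String)) : Prop :=
  (template_vars.map Prod.fst).Nodup
instance (template_vars : List (String × String)) : Decidable (Pre_build_variable_mapping_py template_vars) := by unfold Pre_build_variable_mapping_py; infer_instance

def pvWitness_build_variable_mapping_py : (List (String × String)) :=
  [("path", "/etc/ssh"), ("KEY", "Protocol"), ("other", "x")]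

def Spec_build_variable_mapping_py (template_vars : List (String × String)) (out : List (String × String)) : Prop := out = build_variable_mapping_py_alt template_vars
instance (template_vars : List (String × String)) (out : List (String × String)) : Decidable (Spec_build_variable_mapping_py template_vars out) := by unfold Spec_build_variable_mapping_py; infer_instance

-- ===== CLAIM (what is proved, stated in full; the proofs are below) =====
def Claim_equal_build_variable_mapping_py : Prop := ∀ (template_vars : List (String × String)), Dom_build_variable_mapping_py template_vars → Pre_build_variable_mapping_py template_vars → Spec_build_variable_mapping_py template_vars (build_variable_mapping_py template_vars)

-- ===== LEMMAS AND PROOFS =====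

-- A's first-loop entry for an uppercase name (lower key wins, else the uppercase key)
def pvHeadEntry (tv : PySem.Dict String String) (u : String) : Option (String × String) :=
  match tv.get? (PySem.Str.lower u) with
  | some v => some (u, v)
  | none => (tv.get? u).map (fun v => (u, v))

-- the three independent components of pvClassStep
def pvStepLow (d : PySem.Dict String String) (kv : String × String) : PySem.Dict String String :=
  match pvLowerToUpper.get? kv.1 with
  | some name => d.insert name kv.2
  | none => d

def pvStepUp (d : PySem.Dict String String) (kv : String × String) : PySem.Dict String String :=
  match pvLowerToUpper.get? kv.1 with
  | some _ => d
  | none => if pvKnownSetB.contains kv.1 then d.insert kv.1 kv.2 else d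

def pvExtraCond (kv : String × String) : Bool :=
  (pvLowerToUpper.get? kv.1).isNone && !(pvKnownSetB.contains kv.1) && pvIsupperStr kv.1

theorem pv_get?_mk_mem :
    ∀ (pairs : List (String × String)) (k v : String),
      (PySem.Dict.mk pairs).get? k = some v → (k, v) ∈ pairs := by
  intro pairs
  induction pairs with
  | nil => intro k v h; exact absurd h (by simp [show (PySem.Dict.mk ([] : List (String × String))).get? k = none from rfl])
  | cons p rest ih =>
    intro k v h
    rw [show PySem.Dict.mk (p :: rest) = PySem.Dict.mk ((p.1, p.2) :: rest) from by simp,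
        PySem.Dict.get?_mk_cons] at h
    split at h
    · next hbeq =>
      injection h with h
      have : p.1 = k := by exact eq_of_beq hbeq
      simp [← this, ← h]
    · exact List.mem_cons_of_mem _ (ih k v h)

theorem pv_l2u_some {k name : String} (h : pvLowerToUpper.get? k = some name) :
    name ∈ pvKnownB ∧ k = PySem.Str.lower name := by
  have hm : (k, name) ∈ pvKnownB.map (fun n => (PySem.Str.lower n, n)) :=
    pv_get?_mk_mem _ _ _ h
  rw [List.mem_map] at hm
  obtain ⟨u, hu, he⟩ := hm
  injection he with h1 h2
  exact ⟨h2 ▸ hu, h1.symm ▸ h2 ▸ rfl⟩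

theorem pv_l2u_lower {u : String} (hu : u ∈ pvKnownB) :
    pvLowerToUpper.get? (PySem.Str.lower u) = some u := by
  simp only [pvKnownB, List.mem_cons, List.not_mem_nil, or_false] at hu
  rcases hu with rfl | rfl | rfl | rfl | rfl | rfl | rfl <;> decide

theorem pv_known_l2u_none {u : String} (hu : u ∈ pvKnownB) :
    pvLowerToUpper.get? u = none := by
  simp only [pvKnownB, List.mem_cons, List.not_mem_nil, or_false] at hu
  rcases hu with rfl | rfl | rfl | rfl | rfl | rfl | rfl <;> decide

theorem pv_known_contains {u : String} (hu : u ∈ pvKnownB) :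
    pvKnownSetB.contains u = true := by
  simp only [pvKnownB, List.mem_cons, List.not_mem_nil, or_false] at hu
  rcases hu with rfl | rfl | rfl | rfl | rfl | rfl | rfl <;> decide

theorem pv_contains_known {k : String} (h : pvKnownSetB.contains k = true) :
    k ∈ pvKnownB := by
  have : pvKnownSetB = pvKnownB := by decide
  rw [this] at h
  exact List.contains_iff_mem.mp h

theorem pv_lower_inj {u u' : String} (hu : u ∈ pvKnownB) (hu' : u' ∈ pvKnownB)
    (h : PySem.Str.lower u = PySem.Str.lower u') : u = u' := by
  simp only [pvKnownB, List.mem_cons, List.not_mem_nil, or_false] at hu hu'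
  rcases hu with rfl | rfl | rfl | rfl | rfl | rfl | rfl <;>
    rcases hu' with rfl | rfl | rfl | rfl | rfl | rfl | rfl <;> revert h <;> decide

theorem pv_isupper_lower {u : String} (hu : u ∈ pvKnownB) :
    pvIsupperStr (PySem.Str.lower u) = false := by
  simp only [pvKnownB, List.mem_cons, List.not_mem_nil, or_false] at hu
  rcases hu with rfl | rfl | rfl | rfl | rfl | rfl | rfl <;> decide

-- the classification fold is three independent folds (and the extra bucket is a filter)
theorem pv_class_factor :
    ∀ (l : List (String × String)) (a b : PySem.Dict String String) (c : List (String × String)),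
      l.foldl pvClassStep (a, b, c)
        = (l.foldl pvStepLow a, l.foldl pvStepUp b, c ++ l.filter pvExtraCond) := by
  intro l
  induction l with
  | nil => intro a b c; simp
  | cons kv rest ih =>
    intro a b c
    simp only [List.foldl_cons, List.filter_cons]
    cases h1 : pvLowerToUpper.get? kv.1 with
    | some name =>
      rw [show pvClassStep (a, b, c) kv = (a.insert name kv.2, b, c) from by
            simp only [pvClassStep, h1],
          show pvStepLow a kv = a.insert name kv.2 from by simp only [pvStepLow, h1],
          show pvStepUp b kv = b from by simp only [pvStepUp, h1],
          show pvExtraCond kv = false from by simp only [pvExtraCond, h1]; rfl]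
      simp [ih]
    | none =>
      cases h2 : pvKnownSetB.contains kv.1 with
      | true =>
        rw [show pvClassStep (a, b, c) kv = (a, b.insert kv.1 kv.2, c) from by
              simp only [pvClassStep, h1]; rw [if_pos h2],
            show pvStepLow a kv = a from by simp only [pvStepLow, h1],
            show pvStepUp b kv = b.insert kv.1 kv.2 from by
              simp only [pvStepUp, h1]; rw [if_pos h2],
            show pvExtraCond kv = false from by simp only [pvExtraCond, h1, h2]; rfl]
        simp [ih]
      | false =>
        have h2' : ¬ (pvKnownSetB.contains kv.1 = true) := by rw [h2]; simp
        cases h3 : pvIsupperStr kv.1 with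
        | true =>
          rw [show pvClassStep (a, b, c) kv = (a, b, c ++ [kv]) from by
                simp only [pvClassStep, h1]; rw [if_neg h2', if_pos h3],
              show pvStepLow a kv = a from by simp only [pvStepLow, h1],
              show pvStepUp b kv = b from by simp only [pvStepUp, h1]; rw [if_neg h2'],
              show pvExtraCond kv = true from by simp only [pvExtraCond, h1, h2, h3]; rfl]
          simp [ih]
        | false =>
          have h3' : ¬ (pvIsupperStr kv.1 = true) := by simp [h3]
          rw [show pvClassStep (a, b, c) kv = (a, b, c) from by
                simp only [pvClassStep, h1]; rw [if_neg h2', if_neg h3'],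
              show pvStepLow a kv = a from by simp only [pvStepLow, h1],
              show pvStepUp b kv = b from by simp only [pvStepUp, h1]; rw [if_neg h2'],
              show pvExtraCond kv = false from by simp only [pvExtraCond, h1, h2, h3]; rfl]
          simp [ih]

-- the low bucket looks up the lowercase form of a known name in the input
theorem pv_lowFold_get :
    ∀ (l : List (String × String)) (d : PySem.Dict String String) (u : String),
      u ∈ pvKnownB → (l.map Prod.fst).Nodup →
      (l.foldl pvStepLow d).get? u
        = ((PySem.Dict.mk l).get? (PySem.Str.lower u)).or (d.get? u) := by
  intro l
  induction l with
  | nil => intro d u _ _; rfl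
  | cons kv rest ih =>
    intro d u hu hnd
    rw [List.map_cons, List.nodup_cons] at hnd
    obtain ⟨hkn, hrest⟩ := hnd
    rw [List.foldl_cons,
        show PySem.Dict.mk (kv :: rest) = PySem.Dict.mk ((kv.1, kv.2) :: rest) from by simp,
        PySem.Dict.get?_mk_cons]
    cases h1 : pvLowerToUpper.get? kv.1 with
    | some name =>
      obtain ⟨hnk, hkl⟩ := pv_l2u_some h1
      rw [show pvStepLow d kv = d.insert name kv.2 from by simp [pvStepLow, h1]]
      by_cases hn : name = u
      · subst hn
        have hbeq : (kv.1 == PySem.Str.lower name) = true := by simp [hkl]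
        rw [ih (d.insert name kv.2) name hu hrest]
        have hnone : (PySem.Dict.mk rest).get? (PySem.Str.lower name) = none := by
          rw [PySem.Dict.get?_eq_none_iff_not_mem_keys]
          show PySem.Str.lower name ∉ rest.map Prod.fst
          rw [← hkl]; exact hkn
        rw [hnone, hbeq]
        simp [Option.or, PySem.Dict.get?_insert_self]
      · have hbeq : (kv.1 == PySem.Str.lower u) = false := by
          simp only [beq_eq_false_iff_ne, ne_eq, hkl]
          intro h
          exact hn (pv_lower_inj hnk hu h)
        rw [hbeq, ih (d.insert name kv.2) u hu hrest,
            PySem.Dict.get?_insert_of_ne _ _ (fun h => hn h.symm)]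
        simp
    | none =>
      have hbeq : (kv.1 == PySem.Str.lower u) = false := by
        simp only [beq_eq_false_iff_ne, ne_eq]
        intro h
        rw [h, pv_l2u_lower hu] at h1
        exact absurd h1 (by simp)
      rw [show pvStepLow d kv = d from by simp [pvStepLow, h1], hbeq, ih d u hu hrest]
      simp

-- the up bucket looks up the known name itself in the input
theorem pv_upFold_get :
    ∀ (l : List (String × String)) (d : PySem.Dict String String) (u : String),
      u ∈ pvKnownB → (l.map Prod.fst).Nodup →
      (l.foldl pvStepUp d).get? u = ((PySem.Dict.mk l).get? u).or (d.get? u) := by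
  intro l
  induction l with
  | nil => intro d u _ _; rfl
  | cons kv rest ih =>
    intro d u hu hnd
    rw [List.map_cons, List.nodup_cons] at hnd
    obtain ⟨hkn, hrest⟩ := hnd
    rw [List.foldl_cons,
        show PySem.Dict.mk (kv :: rest) = PySem.Dict.mk ((kv.1, kv.2) :: rest) from by simp,
        PySem.Dict.get?_mk_cons]
    by_cases hk : kv.1 = u
    · have hbeq : (kv.1 == u) = true := by simp [hk]
      rw [show pvStepUp d kv = d.insert kv.1 kv.2 from by
            simp only [pvStepUp, hk, pv_known_l2u_none hu]
            rw [if_pos (pv_known_contains hu)],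
          ih (d.insert kv.1 kv.2) u hu hrest]
      have hnone : (PySem.Dict.mk rest).get? u = none := by
        rw [PySem.Dict.get?_eq_none_iff_not_mem_keys]
        show u ∉ rest.map Prod.fst
        rw [← hk]; exact hkn
      rw [hnone, hbeq, hk]
      simp [Option.or, PySem.Dict.get?_insert_self]
    · have hbeq : (kv.1 == u) = false := by simp [hk]
      have hget : ∀ e, pvStepUp d kv = e → e.get? u = d.get? u := by
        intro e he
        cases h1 : pvLowerToUpper.get? kv.1 with
        | some name => rw [← he]; simp only [pvStepUp, h1]
        | none =>
          cases h2 : pvKnownSetB.contains kv.1 with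
          | true =>
            rw [← he]
            simp only [pvStepUp, h1]
            rw [if_pos h2]
            exact PySem.Dict.get?_insert_of_ne _ _ (fun h => hk h.symm)
          | false =>
            rw [← he]
            simp only [pvStepUp, h1]
            rw [if_neg (by rw [h2]; simp)]
      rw [hbeq, ih (pvStepUp d kv) u hu hrest, hget _ rfl]
      simp

theorem pv_filterMap_congr {α β : Type} {f g : α → Option β} :
    ∀ (l : List α), (∀ a ∈ l, f a = g a) → l.filterMap f = l.filterMap g := by
  intro l
  induction l with
  | nil => intro _; rfl
  | cons x xs ih =>
    intro h
    rw [List.filterMap_cons, List.filterMap_cons, h x (by simp),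
        ih (fun a ha => h a (by simp [ha]))]

-- B's assembly entries coincide with A's first-loop entries
theorem pv_head_eq (template_vars : List (String × String))
    (hpre : (template_vars.map Prod.fst).Nodup) :
    pvKnownB.filterMap
        (fun x => pvBEntry (template_vars.foldl pvStepLow (PySem.Dict.mk []))
                  (template_vars.foldl pvStepUp (PySem.Dict.mk [])) x)
      = pvKnownB.filterMap (pvHeadEntry (PySem.Dict.mk template_vars)) := by
  apply pv_filterMap_congr
  intro u hu
  rw [pvBEntry, pvHeadEntry,
      pv_lowFold_get template_vars (PySem.Dict.mk []) u hu hpre,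
      pv_upFold_get template_vars (PySem.Dict.mk []) u hu hpre]
  cases (PySem.Dict.mk template_vars).get? (PySem.Str.lower u) <;>
    cases (PySem.Dict.mk template_vars).get? u <;>
      simp [Option.or, show (PySem.Dict.mk ([] : List (String × String))).get? u = none from rfl]

-- every key of the assembled head is a known name
theorem pv_head_keys_sub (tv : PySem.Dict String String) {p : String × String}
    (hp : p ∈ pvKnownB.filterMap (pvHeadEntry tv)) : p.1 ∈ pvKnownB := by
  rw [List.mem_filterMap] at hp
  obtain ⟨u, hu, he⟩ := hp
  unfold pvHeadEntry at he
  cases h1 : tv.get? (PySem.Str.lower u) <;> rw [h1] at he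
  · cases h2 : tv.get? u <;> rw [h2] at he
    · exact absurd he (by simp)
    · simp only [Option.map_some, Option.some.injEq] at he
      rw [← he]
      exact hu
  · simp only [Option.some.injEq] at he
    rw [← he]
    exact hu

-- a known name that is a key of the input is a key of the assembled head
theorem pv_head_contains_of_known (tv : PySem.Dict String String) {k v : String}
    (hk : k ∈ pvKnownB) (hv : tv.get? k = some v) :
    (PySem.Dict.mk (pvKnownB.filterMap (pvHeadEntry tv))).contains k = true := by
  have : ∃ w, pvHeadEntry tv k = some (k, w) := by
    unfold pvHeadEntry
    cases h1 : tv.get? (PySem.Str.lower k) with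
    | some w => exact ⟨w, rfl⟩
    | none => exact ⟨v, by rw [hv]; rfl⟩
  obtain ⟨w, hw⟩ := this
  have hmem : (k, w) ∈ pvKnownB.filterMap (pvHeadEntry tv) :=
    List.mem_filterMap.mpr ⟨k, hk, hw⟩
  rw [PySem.Dict.contains_eq_decide_mem_keys]
  simp only [PySem.Dict.keys, decide_eq_true_eq]
  exact List.mem_map_of_mem (f := Prod.fst) hmem

-- A's second loop, run on items with distinct keys, appends exactly a filter
theorem pv_foldTail_gen :
    ∀ (items : List (String × String)) (d : PySem.Dict String String),
      (items.map Prod.fst).Nodup →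
      items.foldl
        (fun m kv => if pvIsupperStr kv.1 && !(m.contains kv.1) then m.insert kv.1 kv.2 else m) d
        = PySem.Dict.mk (d.items ++ items.filter (fun kv => pvIsupperStr kv.1 && !(d.contains kv.1))) := by
  intro items
  induction items with
  | nil => intro d _; exact PySem.Dict.ext (by simp)
  | cons kv rest ih =>
    obtain ⟨k, v⟩ := kv
    intro d hnd
    rw [List.map_cons, List.nodup_cons] at hnd
    obtain ⟨hkn, hrest⟩ := hnd
    simp only [List.foldl_cons, List.filter_cons]
    by_cases hc : (pvIsupperStr k && !(d.contains k)) = true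
    · have hnc : d.contains k = false := by
        cases hdc : d.contains k with
        | false => rfl
        | true => rw [hdc] at hc; simp at hc
      rw [if_pos hc, ih (d.insert k v) hrest]
      have hfilter : rest.filter (fun p => pvIsupperStr p.1 && !((d.insert k v).contains p.1))
          = rest.filter (fun p => pvIsupperStr p.1 && !(d.contains p.1)) := by
        apply List.filter_congr
        intro p hp
        have hpk : (p.1 == k) = false := by
          simp only [beq_eq_false_iff_ne, ne_eq]
          intro h
          have hm := List.mem_map_of_mem (f := Prod.fst) hp
          exact hkn (h ▸ hm)
        rw [PySem.Dict.contains_insert, hpk]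
        simp
      rw [hfilter, PySem.Dict.items_insert_of_not_contains _ _ hnc]
      have : (pvIsupperStr (k, v).1 && !(d.contains (k, v).1)) = true := hc
      rw [if_pos this]
      exact PySem.Dict.ext (by simp)
    · rw [if_neg hc, ih d hrest]
      have : ¬ ((pvIsupperStr (k, v).1 && !(d.contains (k, v).1)) = true) := hc
      rw [if_neg this]

-- A's first loop over (U, lower U) pairs computes exactly the head entries
theorem pv_foldA_gen (tv : PySem.Dict String String) :
    ∀ (us : List String) (acc : List (String × String)),
      us.Nodup →
      (∀ u ∈ us, PySem.Str.upper (PySem.Str.lower u) = u) →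
      (∀ u ∈ us, u ∉ acc.map Prod.fst) →
      (us.map (fun u => (u, PySem.Str.lower u))).foldl (pvStepA tv) (PySem.Dict.mk acc)
        = PySem.Dict.mk (acc ++ us.filterMap (pvHeadEntry tv)) := by
  intro us
  induction us with
  | nil => intro acc _ _ _; simp
  | cons u us ih =>
    intro acc hnd hup hfresh
    obtain ⟨hnotin, hnd⟩ := List.nodup_cons.mp hnd
    have hu : PySem.Str.upper (PySem.Str.lower u) = u := hup u (by simp)
    have hcu : (PySem.Dict.mk acc).contains u = false := by
      simp [PySem.Dict.contains_eq_decide_mem_keys, PySem.Dict.keys, hfresh u (by simp)]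
    have hfresh' : ∀ (v : String), ∀ x ∈ us, x ∉ ((acc ++ [(u, v)]).map Prod.fst) := by
      intro v x hx
      simp only [List.map_append, List.mem_append]
      rintro (h | h)
      · exact hfresh x (by simp [hx]) h
      · simp at h
        exact hnotin (h ▸ hx)
    simp only [List.map_cons, List.foldl_cons, List.filterMap_cons]
    cases h1 : tv.get? (PySem.Str.lower u) with
    | some v =>
      have hins : (PySem.Dict.mk acc).insert u v = PySem.Dict.mk (acc ++ [(u, v)]) :=
        PySem.Dict.ext (by simp [PySem.Dict.items_insert_of_not_contains _ _ hcu])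
      rw [show pvStepA tv (PySem.Dict.mk acc) (u, PySem.Str.lower u) = (PySem.Dict.mk acc).insert u v
            from by simp [pvStepA, h1],
          show pvHeadEntry tv u = some (u, v) from by simp [pvHeadEntry, h1],
          hins, ih (acc ++ [(u, v)]) hnd (fun x hx => hup x (by simp [hx])) (hfresh' v)]
      simp
    | none =>
      cases h2 : tv.get? u with
      | some v =>
        have hins : (PySem.Dict.mk acc).insert u v = PySem.Dict.mk (acc ++ [(u, v)]) :=
          PySem.Dict.ext (by simp [PySem.Dict.items_insert_of_not_contains _ _ hcu])
        rw [show pvStepA tv (PySem.Dict.mk acc) (u, PySem.Str.lower u) = (PySem.Dict.mk acc).insert u v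
              from by simp [pvStepA, h1, hu, h2],
            show pvHeadEntry tv u = some (u, v) from by simp [pvHeadEntry, h1, h2],
            hins, ih (acc ++ [(u, v)]) hnd (fun x hx => hup x (by simp [hx])) (hfresh' v)]
        simp
      | none =>
        rw [show pvStepA tv (PySem.Dict.mk acc) (u, PySem.Str.lower u) = PySem.Dict.mk acc
              from by simp [pvStepA, h1, hu, h2],
            show pvHeadEntry tv u = none from by simp [pvHeadEntry, h1, h2]]
        simpa using ih acc hnd (fun x hx => hup x (by simp [hx])) (fun x hx => hfresh x (by simp [hx]))

theorem pv_varMapA_eq : pvVarMapA = pvKnownB.map (fun u => (u, PySem.Str.lower u)) := by decide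

theorem pv_knownB_upper : ∀ u ∈ pvKnownB, PySem.Str.upper (PySem.Str.lower u) = u := by decide

theorem pv_knownB_nodup : pvKnownB.Nodup := by decide

-- A's tail condition agrees with B's classification condition on the input's items
theorem pv_tail_cond (template_vars : List (String × String))
    (hpre : (template_vars.map Prod.fst).Nodup) :
    ∀ kv ∈ template_vars,
      (pvIsupperStr kv.1
        && !((PySem.Dict.mk (pvKnownB.filterMap (pvHeadEntry (PySem.Dict.mk template_vars)))).contains kv.1))
      = pvExtraCond kv := by
  intro kv hkv
  unfold pvExtraCond
  cases h1 : pvLowerToUpper.get? kv.1 with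
  | some name =>
    obtain ⟨hnk, hkl⟩ := pv_l2u_some h1
    rw [hkl, pv_isupper_lower hnk]
    simp
  | none =>
    cases h2 : pvKnownSetB.contains kv.1 with
    | true =>
      have hk : kv.1 ∈ pvKnownB := pv_contains_known h2
      have hv : (PySem.Dict.mk template_vars).get? kv.1 = some kv.2 :=
        PySem.Dict.get?_of_mem_items _ (by exact hkv) (by exact hpre)
      rw [pv_head_contains_of_known _ hk hv]
      simp
    | false =>
      have hc : (PySem.Dict.mk (pvKnownB.filterMap (pvHeadEntry (PySem.Dict.mk template_vars)))).contains kv.1 = false := by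
        rw [PySem.Dict.contains_eq_decide_mem_keys]
        simp only [PySem.Dict.keys, decide_eq_false_iff_not]
        intro hmem
        rw [List.mem_map] at hmem
        obtain ⟨p, hp, hp1⟩ := hmem
        rw [pv_known_contains (hp1 ▸ pv_head_keys_sub _ hp)] at h2
        exact absurd h2 (by simp)
      rw [hc]
      simp

-- ===== VERDICT (by name: the statement is the Claim_ definition above) =====
theorem build_variable_mapping_py_spec : Claim_equal_build_variable_mapping_py := by
  intro template_vars _ hpre
  unfold Spec_build_variable_mapping_py build_variable_mapping_py build_variable_mapping_py_alt
  simp only [pv_class_factor, List.nil_append]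
  rw [show (PySem.Dict.empty : PySem.Dict String String) = PySem.Dict.mk [] from rfl,
      pv_varMapA_eq,
      pv_foldA_gen (PySem.Dict.mk template_vars) pvKnownB [] pv_knownB_nodup pv_knownB_upper
        (by intro u _ h; simp at h),
      List.nil_append,
      pv_foldTail_gen template_vars _ (by exact hpre)]
  rw [pv_head_eq template_vars hpre]
  have hextra_nodup : ((template_vars.filter pvExtraCond).map Prod.fst).Nodup :=
    List.Nodup.sublist (List.Sublist.map Prod.fst List.filter_sublist) hpre
  have hextra_fresh : ∀ kv ∈ template_vars.filter pvExtraCond,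
      (PySem.Dict.mk (pvKnownB.filterMap (pvHeadEntry (PySem.Dict.mk template_vars)))).contains kv.1 = false := by
    intro kv hkv
    rw [List.mem_filter] at hkv
    have h2 : pvKnownSetB.contains kv.1 = false := by
      unfold pvExtraCond at hkv
      cases h : pvKnownSetB.contains kv.1 with
      | false => rfl
      | true => rw [h] at hkv; simp at hkv
    rw [PySem.Dict.contains_eq_decide_mem_keys]
    simp only [PySem.Dict.keys, decide_eq_false_iff_not]
    intro hmem
    rw [List.mem_map] at hmem
    obtain ⟨p, hp, hp1⟩ := hmem
    rw [pv_known_contains (hp1 ▸ pv_head_keys_sub _ hp)] at h2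
    exact absurd h2 (by simp)
  rw [show (template_vars.filter pvExtraCond).foldl
        (fun (m : PySem.Dict String String) kv => m.insert kv.1 kv.2)
        (PySem.Dict.mk (pvKnownB.filterMap (pvHeadEntry (PySem.Dict.mk template_vars))))
      = (template_vars.filter pvExtraCond).foldl
        (fun (m : PySem.Dict String String) kv => m.insert ((fun (p : String × String) => p.1) kv) ((fun (p : String × String) => p.2) kv))
        (PySem.Dict.mk (pvKnownB.filterMap (pvHeadEntry (PySem.Dict.mk template_vars)))) from rfl]
  rw [PySem.Dict.items_foldl_insert_fresh _ _ _ _ hextra_fresh (by simpa using hextra_nodup)]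
  rw [show (PySem.Dict.mk ((pvKnownB.filterMap (pvHeadEntry (PySem.Dict.mk template_vars)))
        ++ template_vars.filter (fun kv => pvIsupperStr kv.1
            && !((PySem.Dict.mk (pvKnownB.filterMap (pvHeadEntry (PySem.Dict.mk template_vars)))).contains kv.1)))).items
      = (pvKnownB.filterMap (pvHeadEntry (PySem.Dict.mk template_vars)))
        ++ template_vars.filter (fun kv => pvIsupperStr kv.1
            && !((PySem.Dict.mk (pvKnownB.filterMap (pvHeadEntry (PySem.Dict.mk template_vars)))).contains kv.1)) from rfl]
  rw [List.filter_congr (pv_tail_cond template_vars hpre)]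
  simp
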